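-- pv_equiv track=rewrite | github.com/rayzzy114/mask24bot_flow_clone | app/overrides.py | _is_same_url
-- ===== SOURCE A (Python) =====
-- def _normalize_url(value: str) -> str:
--     raw = (value or "").strip().rstrip("/")
--     if not raw:
--         return ""
--     return raw
--
-- def _is_same_url(url: str, aliases: tuple[str, ...]) -> bool:
--     normalized = _normalize_url(url)
--     if not normalized:
--         return False
--     if normalized in {_normalize_url(alias) for alias in aliases if alias}:
--         return True
--
--     normalized_alt = normalized.replace("http://", "https://")
--     alias_set_alt = {
--         _normalize_url(alias).replace("http://", "https://")
--         for alias in aliases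
--         if alias
--     }
--     return normalized_alt in alias_set_alt
-- ===== SOURCE B (Python) =====
-- def _canonical(value: str) -> str:
--     raw = (value or "").strip().rstrip("/")
--     return raw.replace("http://", "https://")
--
-- def _is_same_url(url: str, aliases: tuple[str, ...]) -> bool:
--     key = _canonical(url)
--     if not key:
--         return False
--     return any(_canonical(alias) == key for alias in aliases)
-- ===== Notes on version B (the rewrite author's own statement) =====
-- stated objective: faster
-- what changed: B maps every string (url and each alias, no truthiness filter needed) to one canonical key -- strip, drop trailing slashes, rewrite http:// to https:// -- and does a single short-circuiting any() key comparison, exploiting that A's separate exact-match membership test is redundant because exact equality implies equality of the canonical forms; A's two set-building passes and two membership tests disappear.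
import Mathlib
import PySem

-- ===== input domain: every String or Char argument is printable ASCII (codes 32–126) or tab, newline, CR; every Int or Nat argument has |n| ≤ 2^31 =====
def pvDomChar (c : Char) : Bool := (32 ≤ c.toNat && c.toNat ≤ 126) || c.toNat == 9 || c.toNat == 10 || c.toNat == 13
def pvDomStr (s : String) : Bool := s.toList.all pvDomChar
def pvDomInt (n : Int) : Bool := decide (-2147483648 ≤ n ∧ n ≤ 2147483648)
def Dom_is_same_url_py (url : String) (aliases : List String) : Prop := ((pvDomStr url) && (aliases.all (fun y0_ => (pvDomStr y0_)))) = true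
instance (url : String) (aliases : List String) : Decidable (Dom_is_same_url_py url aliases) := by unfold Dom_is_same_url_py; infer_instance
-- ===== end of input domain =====

-- B collapses A's two set-building passes and two membership tests into one canonical key
-- (strip + drop trailing '/' + http->https rewrite) compared once per alias (objective: faster, measured).

-- ===== PORT A =====
-- _normalize_url; rstrip("/") is ported by hand (exact): drop trailing '/' characters
def pv_normalize_url (value : String) : String :=
  let raw := String.ofList (((PySem.Str.strip value).toList.reverse.dropWhile (fun c => c == '/')).reverse)
  if raw = "" then "" else raw

def is_same_url_py (url : String) (aliases : List String) : Bool :=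
  let normalized := pv_normalize_url url
  if normalized = "" then false
  else if normalized ∈ PySem.Set.ofList ((aliases.filter (fun a => a ≠ "")).map pv_normalize_url) then true
  else
    let normalized_alt := PySem.Str.replace normalized "http://" "https://"
    decide (normalized_alt ∈ PySem.Set.ofList
      ((aliases.filter (fun a => a ≠ "")).map
        (fun a => PySem.Str.replace (pv_normalize_url a) "http://" "https://")))

-- ===== PORT B =====
def pv_canonical (value : String) : String :=
  let raw := String.ofList (((PySem.Str.strip value).toList.reverse.dropWhile (fun c => c == '/')).reverse)
  PySem.Str.replace raw "http://" "https://"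

def is_same_url_py_alt (url : String) (aliases : List String) : Bool :=
  let key := pv_canonical url
  if key = "" then false
  else aliases.any (fun a => pv_canonical a == key)

-- ===== PRECONDITION & SPEC =====
def Spec_is_same_url_py (url : String) (aliases : List String) (out : Bool) : Prop := out = is_same_url_py_alt url aliases
instance (url : String) (aliases : List String) (out : Bool) : Decidable (Spec_is_same_url_py url aliases out) := by unfold Spec_is_same_url_py; infer_instance

-- ===== CLAIM =====
def Claim_equal_is_same_url_py : Prop := ∀ (url : String) (aliases : List String), Dom_is_same_url_py url aliases → Spec_is_same_url_py url aliases (is_same_url_py url aliases)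

-- ===== LEMMAS AND PROOFS =====
theorem pv_if_empty_id (s : String) : (if s = "" then "" else s) = s := by
  split
  · next h => exact h.symm
  · rfl

-- pv_canonical is the http->https rewrite of pv_normalize_url (they only differ on the
-- raw = "" branch, where both produce "").
theorem pv_canonical_eq (v : String) :
    pv_canonical v = PySem.Str.replace (pv_normalize_url v) "http://" "https://" := by
  simp only [pv_canonical, pv_normalize_url, pv_if_empty_id]

-- replace.go never returns [] when the replacement is nonempty and there is anything to emit
theorem pv_replace_go_ne_nil (old new : List Char) (hnew : new ≠ []) :
    ∀ (fuel : Nat) (l acc : List Char), (l ≠ [] ∨ acc ≠ []) →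
      PySem.Chars.replace.go old new fuel l acc ≠ [] := by
  intro fuel
  induction fuel with
  | zero =>
    intro l acc h
    cases l with
    | nil =>
      simp only [PySem.Chars.replace.go]
      rcases h with h | h
      · exact absurd rfl h
      · simpa using h
    | cons c t =>
      simp [PySem.Chars.replace.go]
  | succ n ih =>
    intro l acc h
    cases l with
    | nil =>
      simp only [PySem.Chars.replace.go]
      rcases h with h | h
      · exact absurd rfl h
      · simpa using h
    | cons c t =>
      simp only [PySem.Chars.replace.go]
      split
      · refine ih _ _ (Or.inr fun hc => ?_)
        exact hnew (List.reverse_eq_nil_iff.mp (List.append_eq_nil_iff.mp hc).1)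
      · exact ih _ _ (Or.inr (by simp))

theorem pv_replace_ne_empty (s : String) (hs : s ≠ "") :
    PySem.Str.replace s "http://" "https://" ≠ "" := by
  intro h
  apply hs
  unfold PySem.Str.replace PySem.Chars.replace at h
  rw [if_neg (by decide)] at h
  have hl : s.toList ≠ [] := by
    intro hnil
    apply hs
    have h2 := congrArg String.ofList hnil
    rw [String.ofList_toList] at h2
    exact h2
  exact absurd (by
    have := congrArg String.toList h
    simpa [PySem.Str.replace] using this)
    (by
      intro hh
      exact pv_replace_go_ne_nil "http://".toList "https://".toList (by decide)
        s.toList.length s.toList [] (Or.inl hl) hh)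

-- ===== VERDICT =====
theorem is_same_url_py_spec : Claim_equal_is_same_url_py := by
  intro url aliases _
  unfold Spec_is_same_url_py is_same_url_py is_same_url_py_alt
  rw [pv_canonical_eq]
  by_cases h0 : pv_normalize_url url = ""
  · have hz : PySem.Str.replace "" "http://" "https://" = "" := by decide
    rw [h0]
    simp [hz]
  · have hkey : PySem.Str.replace (pv_normalize_url url) "http://" "https://" ≠ "" :=
      pv_replace_ne_empty _ h0
    rw [if_neg h0, if_neg hkey, Bool.eq_iff_iff]
    simp only [List.any_eq_true, beq_iff_eq, pv_canonical_eq]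
    by_cases h1 : pv_normalize_url url ∈ PySem.Set.ofList ((aliases.filter (fun a => a ≠ "")).map pv_normalize_url)
    · simp only [if_pos h1, true_iff]
      rw [PySem.Set.mem_ofList, List.mem_map] at h1
      obtain ⟨a, ha, hEq⟩ := h1
      rw [List.mem_filter] at ha
      exact ⟨a, ha.1, by rw [hEq]⟩
    · simp only [if_neg h1, decide_eq_true_eq]
      rw [PySem.Set.mem_ofList, List.mem_map]
      constructor
      · rintro ⟨a, ha, hEq⟩
        rw [List.mem_filter] at ha
        exact ⟨a, ha.1, hEq⟩
      · rintro ⟨a, ha, hEq⟩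
        by_cases hne : a = ""
        · exfalso
          apply hkey
          rw [← hEq, hne]
          decide
        · exact ⟨a, List.mem_filter.mpr ⟨ha, by simpa using hne⟩, hEq⟩
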